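-- pv_equiv track=rewrite | github.com/srudny/LookIntoEncryption | aes.py | multPoly
-- ===== SOURCE A (Python) =====
-- hexBin = {'0':'0000','1':'0001','2':'0010','3':'0011','4':'0100','5':'0101','6':'0110','7':'0111','8':'1000','9':'1001','a':'1010','b':'1011','c':'1100','d':'1101','e':'1110','f':'1111'}
--
-- def hexToBin(hexNum):
--     num = ''
--     for n in hexNum:
--         num = num + hexBin[n]
--     return num
--
-- def multPoly(s1,s2):
-- #inputs case and hex
--     poly= ''
--     s2= hexToBin(s2)
--     case2 = '00011011'
--     if s1 == '01':
--         poly = s2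
--     elif s1 == '02':
--         shift = s2[1:] + '0'
--         if s2[0] == '0':
--             poly = shift
--
--         else:
--             for n in range(len(shift)):
--                 if shift[n] == case2[n]:
--                     poly = poly + '0'
--                 else:
--                     poly = poly + '1'
--     else:
--         c2 = ''
--         shift = s2[1:] + '0'
--         if s2[0] == '0':
--             c2 = shift
--
--         else:
--             for n in range(len(shift)):
--                 if shift[n] == case2[n]:
--                     c2 = c2 + '0'
--                 else:
--                     c2 = c2 + '1'
--         for k in range(len(c2)):
--             if c2[k] == s2[k]:
--                 poly = poly + '0'
--             else:
--                 poly = poly + '1'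
--     return poly
-- ===== SOURCE B (Python) =====
-- hexBin = {'0':'0000','1':'0001','2':'0010','3':'0011','4':'0100','5':'0101','6':'0110','7':'0111','8':'1000','9':'1001','a':'1010','b':'1011','c':'1100','d':'1101','e':'1110','f':'1111'}
--
-- def hexToBin(hexNum):
--     num = ''
--     for n in hexNum:
--         num = num + hexBin[n]
--     return num
--
-- def multPoly(s1, s2):
--     b = hexToBin(s2)
--     if s1 == '01':
--         return b
--     w = len(b)
--     v = int(b, 2)
--     x = (v << 1) % (1 << w)
--     if v >> (w - 1):
--         x ^= int('00011011'[:w], 2)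
--     if s1 != '02':
--         x ^= v
--     return format(x, '0{}b'.format(w))
-- ===== Notes on version B (the rewrite author's own statement) =====
-- stated objective: idiomatic
-- what changed: B replaces A's character-by-character shift and XOR string loops by integer bit arithmetic: it parses the binary string once with int(b,2), computes the shifted/reduced value with shift, mod and xor, and formats it back zero-padded, instead of building the result string one compared character at a time.
import Mathlib
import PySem

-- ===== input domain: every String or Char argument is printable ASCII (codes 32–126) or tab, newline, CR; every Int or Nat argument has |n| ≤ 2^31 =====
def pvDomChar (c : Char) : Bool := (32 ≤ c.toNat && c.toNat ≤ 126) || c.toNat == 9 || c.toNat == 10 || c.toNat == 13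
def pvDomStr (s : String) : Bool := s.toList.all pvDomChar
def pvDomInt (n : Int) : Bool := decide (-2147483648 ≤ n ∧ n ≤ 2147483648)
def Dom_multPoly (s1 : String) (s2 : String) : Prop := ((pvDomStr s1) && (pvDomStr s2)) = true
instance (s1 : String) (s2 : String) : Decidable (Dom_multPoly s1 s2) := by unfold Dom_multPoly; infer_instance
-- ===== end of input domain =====

-- B replaces A's character-by-character shift/XOR string loops with integer bit
-- arithmetic (shift, mod, xor, then zero-padded binary formatting): objective 'idiomatic'.

-- ===== PORT A =====
-- shared helper: the module-level dict hexBin and hexToBin (identical in Source A and Source B);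
-- none = KeyError on a non-hex character (excluded by Pre_).
def hexNib (c : Char) : Option (List Char) :=
  if c = '0' then some ['0','0','0','0'] else if c = '1' then some ['0','0','0','1']
  else if c = '2' then some ['0','0','1','0'] else if c = '3' then some ['0','0','1','1']
  else if c = '4' then some ['0','1','0','0'] else if c = '5' then some ['0','1','0','1']
  else if c = '6' then some ['0','1','1','0'] else if c = '7' then some ['0','1','1','1']
  else if c = '8' then some ['1','0','0','0'] else if c = '9' then some ['1','0','0','1']
  else if c = 'a' then some ['1','0','1','0'] else if c = 'b' then some ['1','0','1','1']
  else if c = 'c' then some ['1','1','0','0'] else if c = 'd' then some ['1','1','0','1']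
  else if c = 'e' then some ['1','1','1','0'] else if c = 'f' then some ['1','1','1','1']
  else none

def hexToBin (hexNum : String) : Option (List Char) :=
  hexNum.toList.foldl
    (fun acc n => match acc, hexNib n with
      | some num, some v => some (num ++ v)
      | _, _ => none)
    (some [])

def case2 : List Char := ['0','0','0','1','1','0','1','1']

-- A's "for n in range(len(shift)): compare shift[n] with case2[n]" loop;
-- none = IndexError when case2 is exhausted (excluded by Pre_).
def xorLoop : List Char → List Char → Option (List Char)
  | [], _ => some []
  | _ :: _, [] => none
  | a :: as, b :: bs =>
    match xorLoop as bs with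
    | some r => some ((if a = b then '0' else '1') :: r)
    | none => none

def multPoly (s1 : String) (s2 : String) : String :=
  match hexToBin s2 with
  | none => ""                         -- KeyError (outside Pre_)
  | some s2b =>
    if s1 = "01" then String.mk s2b
    else if s1 = "02" then
      match s2b with
      | [] => ""                       -- s2[0]: IndexError (outside Pre_)
      | c0 :: rest =>
        let shift := rest ++ ['0']
        if c0 = '0' then String.mk shift
        else
          match xorLoop shift case2 with
          | some poly => String.mk poly
          | none => ""                 -- IndexError (outside Pre_)
    else
      match s2b with
      | [] => ""                       -- s2[0]: IndexError (outside Pre_)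
      | c0 :: rest =>
        let shift := rest ++ ['0']
        let c2o := if c0 = '0' then some shift else xorLoop shift case2
        match c2o with
        | none => ""                   -- IndexError (outside Pre_)
        | some c2 =>
          match xorLoop c2 (c0 :: rest) with
          | some poly => String.mk poly
          | none => ""                 -- unreachable: equal lengths

-- ===== PORT B =====
-- int(b, 2) on a binary string
def bitsVal (l : List Char) : Nat :=
  l.foldl (fun a c => 2 * a + (if c = '1' then 1 else 0)) 0

-- format(x, 'b')
def binDigits (n : Nat) : List Char :=
  if h : n < 2 then [if n = 1 then '1' else '0']
  else binDigits (n / 2) ++ [if n % 2 = 1 then '1' else '0']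
  decreasing_by exact Nat.div_lt_self (by omega) (by omega)

-- the zero padding of format(x, '0{w}b')
def padTo (w : Nat) (l : List Char) : List Char :=
  List.replicate (w - l.length) '0' ++ l

def multPoly_alt (s1 : String) (s2 : String) : String :=
  match hexToBin s2 with
  | none => ""                         -- KeyError (outside Pre_)
  | some bl =>
    if s1 = "01" then String.mk bl
    else
      let w := bl.length
      if w = 0 then ""                 -- int('', 2): ValueError (outside Pre_)
      else
        let v := bitsVal bl
        let x0 := (2 * v) % 2 ^ w
        let x1 := if v >>> (w - 1) ≠ 0 then x0 ^^^ bitsVal (case2.take w) else x0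
        let x2 := if s1 = "02" then x1 else x1 ^^^ v
        String.mk (padTo w (binDigits x2))

-- ===== PRECONDITION & SPEC =====
def highHex (c : Char) : Bool :=
  c == '8' || c == '9' || c == 'a' || c == 'b' || c == 'c' || c == 'd' || c == 'e' || c == 'f'

-- Pre_ = exactly the inputs on which A returns: every char of s2 is a lowercase hex
-- digit (else KeyError), and unless s1 = '01', s2 is nonempty (else IndexError on s2[0])
-- and, if the leading bit is 1, at most 2 hex digits (else IndexError on case2[n]).
def Pre_multPoly (s1 : String) (s2 : String) : Prop :=
  (s2.toList.all (fun c => (hexNib c).isSome) &&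
    (s1 == "01" || (!s2.toList.isEmpty &&
      (!highHex (s2.toList.headD '0') || decide (s2.toList.length ≤ 2))))) = true
instance (s1 : String) (s2 : String) : Decidable (Pre_multPoly s1 s2) := by
  unfold Pre_multPoly; infer_instance

def pvWitness_multPoly : String × String := ("02", "d4")

def Spec_multPoly (s1 : String) (s2 : String) (out : String) : Prop := out = multPoly_alt s1 s2
instance (s1 : String) (s2 : String) (out : String) : Decidable (Spec_multPoly s1 s2 out) := by unfold Spec_multPoly; infer_instance

-- ===== CLAIM (what is proved, stated in full; the proofs are below) =====
def Claim_equal_multPoly : Prop := ∀ (s1 : String) (s2 : String), Dom_multPoly s1 s2 → Pre_multPoly s1 s2 → Spec_multPoly s1 s2 (multPoly s1 s2)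

-- ===== LEMMAS AND PROOFS =====

def Bits (l : List Char) : Prop := ∀ c ∈ l, c = '0' ∨ c = '1'

theorem foldl_bits (l : List Char) (a : Nat) :
    List.foldl (fun a c => 2 * a + (if c = '1' then 1 else 0)) a l
      = a * 2 ^ l.length + List.foldl (fun a c => 2 * a + (if c = '1' then 1 else 0)) 0 l := by
  induction l generalizing a with
  | nil => simp
  | cons c t ih =>
      simp only [List.foldl_cons, List.length_cons]
      rw [ih (2 * a + (if c = '1' then 1 else 0)), ih (2 * 0 + (if c = '1' then 1 else 0))]
      ring

theorem bitsVal_cons (c : Char) (t : List Char) :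
    bitsVal (c :: t) = (if c = '1' then 1 else 0) * 2 ^ t.length + bitsVal t := by
  simp only [bitsVal, List.foldl_cons]
  rw [foldl_bits]
  ring

theorem bitsVal_snoc (l : List Char) (c : Char) :
    bitsVal (l ++ [c]) = 2 * bitsVal l + (if c = '1' then 1 else 0) := by
  simp only [bitsVal, List.foldl_append, List.foldl_cons, List.foldl_nil]

theorem bitsVal_lt (l : List Char) : bitsVal l < 2 ^ l.length := by
  induction l with
  | nil => simp [bitsVal]
  | cons c t ih =>
      rw [bitsVal_cons, List.length_cons]
      have hb : (if c = '1' then (1 : Nat) else 0) ≤ 1 := by split <;> omega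
      have hp := pow_succ 2 t.length
      nlinarith

theorem head_shiftRight (c : Char) (t : List Char) :
    bitsVal (c :: t) >>> t.length = (if c = '1' then 1 else 0) := by
  have hp : 0 < 2 ^ t.length := by positivity
  rw [Nat.shiftRight_eq_div_pow, bitsVal_cons, Nat.add_comm,
    Nat.add_mul_div_right _ _ hp, Nat.div_eq_of_lt (bitsVal_lt t), Nat.zero_add]

theorem chunkXor (n i j x y : Nat) (hx : x < 2 ^ n) (hy : y < 2 ^ n) :
    ((i * 2 ^ n + x) ^^^ (j * 2 ^ n + y)) = (i ^^^ j) * 2 ^ n + (x ^^^ y) := by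
  have hxy : (x ^^^ y) < 2 ^ n := Nat.xor_lt_two_pow hx hy
  rw [Nat.mul_comm i, Nat.mul_comm j, Nat.mul_comm (i ^^^ j)]
  apply Nat.eq_of_testBit_eq
  intro k
  simp only [Nat.testBit_xor, Nat.testBit_two_pow_mul_add _ hx, Nat.testBit_two_pow_mul_add _ hy,
    Nat.testBit_two_pow_mul_add _ hxy]
  by_cases hk : k < n <;> simp [hk]

theorem xorLoop_spec (a : List Char) : ∀ (b : List Char), Bits a → Bits b → a.length ≤ b.length →
    ∃ r, xorLoop a b = some r ∧ r.length = a.length ∧ Bits r ∧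
      bitsVal r = bitsVal a ^^^ bitsVal (b.take a.length) := by
  induction a with
  | nil =>
      intro b _ _ _
      exact ⟨[], rfl, rfl, by intro c hc; simp at hc, by simp [bitsVal]⟩
  | cons x a' ih =>
      intro b hba hbb hlen
      cases b with
      | nil => simp at hlen
      | cons y b' =>
          have hxa : x = '0' ∨ x = '1' := hba x (by simp)
          have hyb : y = '0' ∨ y = '1' := hbb y (by simp)
          have hba' : Bits a' := fun c hc => hba c (by simp [hc])
          have hbb' : Bits b' := fun c hc => hbb c (by simp [hc])
          have hlen' : a'.length ≤ b'.length := by simpa using hlen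
          obtain ⟨r, hr, hrlen, hrbits, hrval⟩ := ih b' hba' hbb' hlen'
          refine ⟨(if x = y then '0' else '1') :: r, ?_, by simp [hrlen], ?_, ?_⟩
          · simp only [xorLoop, hr]
          · intro c hc
            rcases List.mem_cons.mp hc with h | h
            · subst h; split <;> simp
            · exact hrbits c h
          · have htlen : (b'.take a'.length).length = a'.length := by
              simp [List.length_take, Nat.min_eq_left hlen']
            have hva : bitsVal a' < 2 ^ a'.length := bitsVal_lt a'
            have hvt : bitsVal (b'.take a'.length) < 2 ^ a'.length := by
              have := bitsVal_lt (b'.take a'.length); rwa [htlen] at this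
            have hz : (if (if x = y then '0' else '1') = '1' then (1:Nat) else 0)
                = (if x = '1' then (1:Nat) else 0) ^^^ (if y = '1' then (1:Nat) else 0) := by
              rcases hxa with hx | hx <;> rcases hyb with hy | hy <;> subst hx <;> subst hy <;> decide
            rw [List.length_cons, List.take_succ_cons, bitsVal_cons, bitsVal_cons,
              bitsVal_cons, htlen, hrlen, hrval, hz,
              chunkXor a'.length _ _ _ _ hva hvt]

-- the flattened hex→binary string (proof-side characterisation of hexToBin)
def nibs (l : List Char) : List Char := l.flatMap (fun c => (hexNib c).getD [])

theorem hexToBin_fold (l : List Char) : ∀ (acc : List Char),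
    (∀ c ∈ l, (hexNib c).isSome = true) →
    List.foldl (fun acc n => match acc, hexNib n with
      | some num, some v => some (num ++ v)
      | _, _ => none) (some acc) l = some (acc ++ nibs l) := by
  induction l with
  | nil => intro acc _; simp [nibs]
  | cons c t ih =>
      intro acc h
      obtain ⟨v, hv⟩ := Option.isSome_iff_exists.mp (h c (by simp))
      simp only [List.foldl_cons, hv]
      rw [ih (acc ++ v) (fun d hd => h d (by simp [hd]))]
      simp [nibs, hv, List.append_assoc]

theorem hexToBin_eq (s : String) (h : ∀ c ∈ s.toList, (hexNib c).isSome = true) :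
    hexToBin s = some (nibs s.toList) := by
  unfold hexToBin
  rw [hexToBin_fold s.toList [] h]
  simp

theorem hexNib_mem (c : Char) (v : List Char) (h : hexNib c = some v) :
    c = '0' ∨ c = '1' ∨ c = '2' ∨ c = '3' ∨ c = '4' ∨ c = '5' ∨ c = '6' ∨ c = '7' ∨
    c = '8' ∨ c = '9' ∨ c = 'a' ∨ c = 'b' ∨ c = 'c' ∨ c = 'd' ∨ c = 'e' ∨ c = 'f' := by
  by_contra hc
  push_neg at hc
  obtain ⟨h0, h1, h2, h3, h4, h5, h6, h7, h8, h9, ha, hb, hcc, hd, he, hf⟩ := hc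
  unfold hexNib at h
  rw [if_neg h0, if_neg h1, if_neg h2, if_neg h3, if_neg h4, if_neg h5, if_neg h6,
    if_neg h7, if_neg h8, if_neg h9, if_neg ha, if_neg hb, if_neg hcc, if_neg hd,
    if_neg he, if_neg hf] at h
  cases h

theorem nibble_facts (c : Char) (v : List Char) (h : hexNib c = some v) :
    v.length = 4 ∧ Bits v ∧ (v.headD 'x' = '1' ↔ highHex c = true) := by
  have hm := hexNib_mem c v h
  rcases hm with hm|hm|hm|hm|hm|hm|hm|hm|hm|hm|hm|hm|hm|hm|hm|hm <;> subst hm <;>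
    (simp only [hexNib, Char.reduceEq, reduceIte, Option.some.injEq] at h) <;> subst h <;>
    refine ⟨rfl, ?_, by decide⟩ <;> intro d hd <;>
    simp only [List.mem_cons, List.not_mem_nil, or_false] at hd <;>
    rcases hd with h | h | h | h <;> simp [h]

theorem nibs_facts (l : List Char) (h : ∀ c ∈ l, (hexNib c).isSome = true) :
    (nibs l).length = 4 * l.length ∧ Bits (nibs l) := by
  induction l with
  | nil => exact ⟨by simp [nibs], by intro c hc; simp [nibs] at hc⟩
  | cons c t ih =>
      obtain ⟨v, hv⟩ := Option.isSome_iff_exists.mp (h c (by simp))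
      obtain ⟨hl4, hb4, _⟩ := nibble_facts c v hv
      obtain ⟨hlt, hbt⟩ := ih (fun d hd => h d (by simp [hd]))
      constructor
      · simp only [nibs, List.flatMap_cons, hv, Option.getD_some, List.length_append,
          List.length_cons]
        simp only [nibs] at hlt
        omega
      · intro d hd
        simp only [nibs, List.flatMap_cons, hv, Option.getD_some, List.mem_append] at hd
        rcases hd with hd | hd
        · exact hb4 d hd
        · exact hbt d hd

theorem nibs_head (c0 : Char) (t : List Char) (h : (hexNib c0).isSome = true) :
    ((nibs (c0 :: t)).headD 'x' = '1') ↔ highHex c0 = true := by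
  obtain ⟨v, hv⟩ := Option.isSome_iff_exists.mp h
  obtain ⟨hl4, _, hiff⟩ := nibble_facts c0 v hv
  cases v with
  | nil => simp at hl4
  | cons a r =>
      simp only [nibs, List.flatMap_cons, hv, Option.getD_some, List.cons_append,
        List.headD_cons]
      simpa using hiff

theorem binDigits_head1 (l : List Char) (hb : Bits l) (hh : l.headD 'x' = '1') :
    binDigits (bitsVal l) = l := by
  induction l using List.reverseRecOn with
  | nil => simp at hh
  | append_singleton m x ih =>
      cases m with
      | nil =>
          simp only [List.nil_append, List.headD_cons] at hh ⊢
          subst hh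
          have h1 : bitsVal ['1'] = 1 := by decide
          rw [h1, binDigits]
          norm_num
      | cons c m' =>
          have hbm : Bits (c :: m') := fun d hd =>
            hb d (by rcases List.mem_cons.mp hd with h | h <;> simp [h, List.mem_append])
          have hhm : (c :: m').headD 'x' = '1' := by simpa using hh
          have hc1 : c = '1' := by simpa using hhm
          have hxm : x = '0' ∨ x = '1' := hb x (by simp [List.mem_append])
          have hpos : 1 ≤ bitsVal (c :: m') := by
            subst hc1
            rw [bitsVal_cons, if_pos rfl, one_mul]
            have h2 : 0 < 2 ^ m'.length := by positivity
            omega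
          rw [bitsVal_snoc, binDigits,
            dif_neg (by rcases hxm with hx | hx <;> subst hx <;> simp <;> omega :
              ¬ (2 * bitsVal (c :: m') + (if x = '1' then (1:Nat) else 0) < 2))]
          have hdiv : (2 * bitsVal (c :: m') + (if x = '1' then (1:Nat) else 0)) / 2
              = bitsVal (c :: m') := by
            rcases hxm with hx | hx <;> subst hx <;> simp <;> omega
          rw [hdiv, ih hbm hhm]
          have hlast : (if (2 * bitsVal (c :: m') + (if x = '1' then (1:Nat) else 0)) % 2 = 1
              then '1' else '0') = x := by
            rcases hxm with hx | hx <;> subst hx <;>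
              simp [Nat.mul_add_mod, Nat.add_mul_mod_self_left]
          rw [hlast]

theorem binDigits_pad (l : List Char) (hb : Bits l) (hne : l ≠ []) :
    padTo l.length (binDigits (bitsVal l)) = l := by
  induction l with
  | nil => simp at hne
  | cons c t ih =>
      have hc : c = '0' ∨ c = '1' := hb c (by simp)
      have hbt : Bits t := fun d hd => hb d (by simp [hd])
      cases t with
      | nil =>
          rcases hc with hc | hc <;> subst hc
          · have h0 : bitsVal ['0'] = 0 := by decide
            rw [h0, binDigits]
            norm_num [padTo]
          · have h1 : bitsVal ['1'] = 1 := by decide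
            rw [h1, binDigits]
            norm_num [padTo]
      | cons d t' =>
          rcases hc with hc | hc <;> subst hc
          · have hv : bitsVal ('0' :: d :: t') = bitsVal (d :: t') := by
              rw [bitsVal_cons]; simp
            have hIH := ih hbt (by simp)
            have hlen : (binDigits (bitsVal (d :: t'))).length ≤ (d :: t').length := by
              by_contra hgt
              push_neg at hgt
              have hz : (d :: t').length - (binDigits (bitsVal (d :: t'))).length = 0 := by omega
              unfold padTo at hIH
              rw [hz] at hIH
              simp only [List.replicate_zero, List.nil_append] at hIH
              rw [hIH] at hgt
              omega
            rw [hv]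
            unfold padTo at hIH ⊢
            have hsub : (('0' :: d :: t')).length - (binDigits (bitsVal (d :: t'))).length
                = ((d :: t').length - (binDigits (bitsVal (d :: t'))).length) + 1 := by
              simp only [List.length_cons] at hlen ⊢
              omega
            rw [hsub, List.replicate_succ, List.cons_append, hIH]
          · have hh : binDigits (bitsVal ('1' :: d :: t')) = '1' :: d :: t' :=
              binDigits_head1 _ hb (by simp)
            rw [hh]
            unfold padTo
            simp

theorem pad_mk (l : List Char) (hb : Bits l) (hne : l ≠ []) (w : Nat) (hw : w = l.length) :
    padTo w (binDigits (bitsVal l)) = l := by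
  rw [hw]; exact binDigits_pad l hb hne

theorem bits_case2 : Bits case2 := by
  intro c hc
  simp only [case2, List.mem_cons, List.not_mem_nil, or_false] at hc
  rcases hc with h | h | h | h | h | h | h | h <;> simp [h]

-- ===== VERDICT (the statement is the Claim_ definition above) =====
theorem pre_unfold (s1 : String) (s2 : String) (h : Pre_multPoly s1 s2) :
    (∀ c ∈ s2.toList, (hexNib c).isSome = true) ∧
    (s1 ≠ "01" → s2.toList ≠ [] ∧
      (highHex (s2.toList.headD '0') = true → s2.toList.length ≤ 2)) := by
  unfold Pre_multPoly at h
  rw [Bool.and_eq_true, Bool.or_eq_true] at h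
  obtain ⟨hall, hor⟩ := h
  constructor
  · intro c hc
    simpa using List.all_eq_true.mp hall c hc
  · intro h01
    rcases hor with h1 | h2
    · exact absurd (by simpa using h1) h01
    · rw [Bool.and_eq_true, Bool.or_eq_true] at h2
      obtain ⟨hne, hor2⟩ := h2
      constructor
      · simpa using hne
      · intro hhigh
        rcases hor2 with h3 | h3
        · rw [Bool.not_eq_true'] at h3
          rw [hhigh] at h3
          cases h3
        · simpa using h3

theorem multPoly_spec : Claim_equal_multPoly := by
  intro s1 s2 _ hpre
  obtain ⟨hhex, hrest⟩ := pre_unfold s1 s2 hpre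
  unfold Spec_multPoly
  have hB : hexToBin s2 = some (nibs s2.toList) := hexToBin_eq s2 hhex
  by_cases h01 : s1 = "01"
  · simp [multPoly, multPoly_alt, hB, h01]
  · obtain ⟨hne, hhigh⟩ := hrest h01
    obtain ⟨c0, t, hs2⟩ : ∃ c0 t, s2.toList = c0 :: t := by
      cases hc : s2.toList with
      | nil => exact absurd hc hne
      | cons c0 t => exact ⟨c0, t, rfl⟩
    obtain ⟨hblen, hbbits⟩ := nibs_facts s2.toList hhex
    obtain ⟨bh, bt, hb⟩ : ∃ bh bt, nibs s2.toList = bh :: bt := by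
      cases hcb : nibs s2.toList with
      | nil => rw [hcb, hs2] at hblen; simp at hblen
      | cons bh bt => exact ⟨bh, bt, rfl⟩
    have hbbits' : Bits (bh :: bt) := hb ▸ hbbits
    have hbh : bh = '0' ∨ bh = '1' := hbbits' bh (by simp)
    have hbt : Bits bt := fun d hd => hbbits' d (by simp [hd])
    have hsbits : Bits (bt ++ ['0']) := by
      intro d hd
      rcases List.mem_append.mp hd with h | h
      · exact hbt d h
      · left; simpa using h
    have hslen : (bt ++ ['0']).length = bt.length + 1 := by simp
    have hsne : bt ++ ['0'] ≠ [] := by simp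
    have hsval : bitsVal (bt ++ ['0']) = 2 * bitsVal bt := by rw [bitsVal_snoc]; simp
    have hvlt : bitsVal bt < 2 ^ bt.length := bitsVal_lt bt
    have hw1 : (bh :: bt).length - 1 = bt.length := by simp
    simp only [multPoly, multPoly_alt, hB, hb, if_neg h01]
    rw [if_neg (show ¬ ((bh :: bt).length = 0) by simp), hw1, head_shiftRight bh bt]
    rcases hbh with hb0 | hb1
    · -- leading bit 0: no reduction by case2
      subst hb0
      have hx0 : 2 * bitsVal ('0' :: bt) % 2 ^ ('0' :: bt).length = bitsVal (bt ++ ['0']) := by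
        rw [bitsVal_cons, if_neg (by decide : ¬ (('0':Char) = '1')), hsval,
          List.length_cons, pow_succ, Nat.zero_mul, Nat.zero_add,
          Nat.mod_eq_of_lt (by omega)]
      rw [if_pos (show ('0':Char) = '0' from rfl), if_pos (show ('0':Char) = '0' from rfl),
        if_neg (show ¬ ((if ('0':Char) = '1' then (1:Nat) else 0) ≠ 0) by decide), hx0]
      by_cases h02 : s1 = "02"
      · rw [if_pos h02, if_pos h02,
          pad_mk (bt ++ ['0']) hsbits hsne (('0' :: bt).length) (by simp)]
      · rw [if_neg h02, if_neg h02]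
        obtain ⟨p, hp, hplen, hpbits, hpval⟩ :=
          xorLoop_spec (bt ++ ['0']) ('0' :: bt) hsbits hbbits' (by simp)
        simp only [hp]
        have htake : ('0' :: bt).take (bt ++ ['0']).length = '0' :: bt := by
          rw [hslen, show bt.length + 1 = ('0' :: bt).length from (List.length_cons ..).symm,
            List.take_length]
        rw [htake] at hpval
        have hpne : p ≠ [] := by
          intro hnil; rw [hnil, hslen] at hplen; simp at hplen
        rw [← hpval, pad_mk p hpbits hpne (('0' :: bt).length) (by rw [hplen, hslen]; simp)]
    · -- leading bit 1: Pre_ bounds the width by 8, the xor with case2 fires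
      subst hb1
      have hc0 : (hexNib c0).isSome = true := hhex c0 (by rw [hs2]; simp)
      have hhead : (nibs (c0 :: t)).headD 'x' = '1' := by rw [← hs2, hb]; rfl
      have hhi : highHex c0 = true := (nibs_head c0 t hc0).mp hhead
      have hlen2 : s2.toList.length ≤ 2 := hhigh (by rw [hs2]; simpa using hhi)
      have hlen8 : bt.length + 1 ≤ 8 := by
        rw [hb, hs2] at hblen
        rw [hs2] at hlen2
        simp only [List.length_cons] at hblen hlen2
        omega
      have hx0 : 2 * bitsVal ('1' :: bt) % 2 ^ ('1' :: bt).length = bitsVal (bt ++ ['0']) := by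
        rw [bitsVal_cons, if_pos (show ('1':Char) = '1' from rfl), one_mul, hsval,
          List.length_cons, pow_succ]
        have h2 : 2 * (2 ^ bt.length + bitsVal bt) = 2 ^ bt.length * 2 + 2 * bitsVal bt := by
          ring
        rw [h2, Nat.add_mod_left, Nat.mod_eq_of_lt (by omega)]
      rw [if_neg (show ¬ (('1':Char) = '0') by decide),
        if_neg (show ¬ (('1':Char) = '0') by decide),
        if_pos (show ((if ('1':Char) = '1' then (1:Nat) else 0) ≠ 0) by decide), hx0]
      obtain ⟨r, hr, hrlen, hrbits, hrval⟩ :=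
        xorLoop_spec (bt ++ ['0']) case2 hsbits bits_case2
          (by rw [hslen]; simpa [case2] using hlen8)
      rw [hr]
      have hrne : r ≠ [] := by intro hnil; rw [hnil, hslen] at hrlen; simp at hrlen
      have hrval' : bitsVal r
          = bitsVal (bt ++ ['0']) ^^^ bitsVal (case2.take ('1' :: bt).length) := by
        rw [hrval, hslen, List.length_cons]
      by_cases h02 : s1 = "02"
      · rw [if_pos h02, if_pos h02, ← hrval',
          pad_mk r hrbits hrne (('1' :: bt).length) (by rw [hrlen, hslen]; simp)]
      · rw [if_neg h02, if_neg h02]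
        obtain ⟨p, hp, hplen, hpbits, hpval⟩ :=
          xorLoop_spec r ('1' :: bt) hrbits hbbits' (by rw [hrlen, hslen]; simp)
        simp only [hp]
        have htake : ('1' :: bt).take r.length = '1' :: bt := by
          rw [hrlen, hslen, show bt.length + 1 = ('1' :: bt).length from (List.length_cons ..).symm,
            List.take_length]
        rw [htake, hrval'] at hpval
        have hpne : p ≠ [] := by
          intro hnil; rw [hnil, hrlen, hslen] at hplen; simp at hplen
        rw [← hpval, pad_mk p hpbits hpne (('1' :: bt).length) (by rw [hplen, hrlen, hslen]; simp)]
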